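-- pv_equiv track=rewrite | github.com/jaehyun230/LeetHub | 2540-minimum-common-value/2540-minimum-common-value.py | getCommon
-- ===== SOURCE A (Python) =====
-- from typing import List
--
-- def getCommon(nums1: List[int], nums2: List[int]) -> int:
--
--     left, left2 = 0, 0
--
--     while left < len(nums1) and left2 < len(nums2) :
--         if nums1[left] == nums2[left2] :
--             return nums1[left]
--         elif nums1[left] < nums2[left2] :
--             left +=1
--         elif nums1[left] > nums2[left2] :
--             left2 +=1
--
--     return -1
-- ===== SOURCE B (Python) =====
-- from typing import List
--
-- def getCommon(nums1: List[int], nums2: List[int]) -> int: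
--     xs = nums1[::-1]
--     ys = nums2[::-1]
--     while xs and ys:
--         if xs[-1] == ys[-1]:
--             return xs[-1]
--         if xs[-1] < ys[-1]:
--             xs.pop()
--         else:
--             ys.pop()
--     return -1
-- ===== Notes on version B (the rewrite author's own statement) =====
-- stated objective: alternative
-- what changed: The two-index pointer walk over fixed arrays is re-expressed as destructive consumption of two stacks: reversed copies of the inputs compared at the top and popped, with no index arithmetic; proved equal on all inputs, so no Pre_ is needed.
import Mathlib
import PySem

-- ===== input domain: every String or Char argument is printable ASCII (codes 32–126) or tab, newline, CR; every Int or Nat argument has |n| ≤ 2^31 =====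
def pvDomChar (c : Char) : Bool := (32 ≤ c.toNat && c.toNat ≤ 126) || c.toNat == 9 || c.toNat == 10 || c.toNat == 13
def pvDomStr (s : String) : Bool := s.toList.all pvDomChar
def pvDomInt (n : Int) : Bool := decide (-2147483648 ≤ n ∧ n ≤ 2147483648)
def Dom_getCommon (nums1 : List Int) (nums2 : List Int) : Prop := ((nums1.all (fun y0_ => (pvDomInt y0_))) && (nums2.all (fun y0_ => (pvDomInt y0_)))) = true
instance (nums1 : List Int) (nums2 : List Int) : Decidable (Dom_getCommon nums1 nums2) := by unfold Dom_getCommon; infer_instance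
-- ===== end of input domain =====

-- B re-expresses A's two-index pointer walk as destructive consumption of two stacks
-- (reversed copies compared at the top and popped); proved equal on ALL inputs (no Pre_).

-- ===== PORT A =====
-- the while loop of A; left/left2 are the two index pointers (both in range inside the loop,
-- so xs[i] is rendered by the total getD)
def getCommonLoop (nums1 : List Int) (nums2 : List Int) (left left2 : Nat) : Int :=
  if h : left < nums1.length ∧ left2 < nums2.length then
    if nums1.getD left 0 = nums2.getD left2 0 then nums1.getD left 0
    else if nums1.getD left 0 < nums2.getD left2 0 then
      getCommonLoop nums1 nums2 (left + 1) left2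
    else
      getCommonLoop nums1 nums2 left (left2 + 1)
  else -1
termination_by (nums1.length - left) + (nums2.length - left2)
decreasing_by all_goals omega

def getCommon (nums1 : List Int) (nums2 : List Int) : Int :=
  getCommonLoop nums1 nums2 0 0

-- ===== PORT B =====
-- the while loop of B; xs, ys are the two stacks, xs[-1] (top, nonempty inside the loop)
-- is rendered by the total getLastD, xs.pop() by dropLast
def altLoop (xs : List Int) (ys : List Int) : Int :=
  if h : xs ≠ [] ∧ ys ≠ [] then
    if xs.getLastD 0 = ys.getLastD 0 then xs.getLastD 0
    else if xs.getLastD 0 < ys.getLastD 0 then altLoop xs.dropLast ys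
    else altLoop xs ys.dropLast
  else -1
termination_by xs.length + ys.length
decreasing_by
  · have := List.length_pos_iff.mpr h.1; simp [List.length_dropLast]; omega
  · have := List.length_pos_iff.mpr h.2; simp [List.length_dropLast]; omega

def getCommon_alt (nums1 : List Int) (nums2 : List Int) : Int :=
  altLoop nums1.reverse nums2.reverse

-- ===== PRECONDITION & SPEC =====
def Spec_getCommon (nums1 : List Int) (nums2 : List Int) (out : Int) : Prop := out = getCommon_alt nums1 nums2
instance (nums1 : List Int) (nums2 : List Int) (out : Int) : Decidable (Spec_getCommon nums1 nums2 out) := by unfold Spec_getCommon; infer_instance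

-- ===== CLAIM (what is proved, stated in full; the proofs are below) =====
def Claim_equal_getCommon : Prop := ∀ (nums1 : List Int) (nums2 : List Int), Dom_getCommon nums1 nums2 → Spec_getCommon nums1 nums2 (getCommon nums1 nums2)

-- ===== LEMMAS AND PROOFS =====

-- the top of the stack holding the reversed suffix from index l is the element at index l
theorem rev_drop_top (xs : List Int) (l : Nat) (hl : l < xs.length) :
    ((xs.drop l).reverse).getLastD 0 = xs.getD l 0 := by
  rw [List.drop_eq_getElem_cons hl, List.getD_eq_getElem _ _ hl]
  simp [List.getLastD_eq_getLast?, List.getLast?_reverse, List.getElem?_eq_getElem hl]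

-- popping that stack yields the reversed suffix from index l+1
theorem rev_drop_pop (xs : List Int) (l : Nat) (hl : l < xs.length) :
    ((xs.drop l).reverse).dropLast = (xs.drop (l + 1)).reverse := by
  rw [List.drop_eq_getElem_cons hl, List.reverse_cons, List.dropLast_concat]

-- invariant: A's loop at pointers (l, l2) computes B's loop on the two remaining stacks
theorem loop_eq_altLoop (nums1 nums2 : List Int) (l l2 : Nat) :
    getCommonLoop nums1 nums2 l l2 =
      altLoop ((nums1.drop l).reverse) ((nums2.drop l2).reverse) := by
  have e1 : ((nums1.drop l).reverse ≠ [] ∧ (nums2.drop l2).reverse ≠ []) ↔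
      (l < nums1.length ∧ l2 < nums2.length) := by
    simp [List.drop_eq_nil_iff]
  rw [getCommonLoop, altLoop]
  split
  case isTrue h =>
    obtain ⟨hl, hl2⟩ := h
    rw [dif_pos (e1.mpr ⟨hl, hl2⟩), rev_drop_top nums1 l hl, rev_drop_top nums2 l2 hl2]
    split
    · rfl
    · split
      · rw [rev_drop_pop nums1 l hl]
        exact loop_eq_altLoop nums1 nums2 (l + 1) l2
      · rw [rev_drop_pop nums2 l2 hl2]
        exact loop_eq_altLoop nums1 nums2 l (l2 + 1)
  case isFalse h =>
    rw [dif_neg (fun hc => h (e1.mp hc))]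
termination_by (nums1.length - l) + (nums2.length - l2)
decreasing_by all_goals omega

-- ===== VERDICT (by name: the statement is the Claim_ definition above) =====
theorem getCommon_spec : Claim_equal_getCommon := by
  intro nums1 nums2 _
  unfold Spec_getCommon getCommon getCommon_alt
  rw [loop_eq_altLoop nums1 nums2 0 0]
  simp
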